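-- pv_equiv track=rewrite | github.com/dhruv-fadadu/Leetcode-Python | 2245-destroying-asteroids/destroying-asteroids.py | asteroidsDestroyed
-- ===== SOURCE A (Python) =====
-- from typing import List
--
-- def asteroidsDestroyed(mass: int, asteroids: List[int]) -> bool:
--     asteroids.sort()
--     for num in asteroids:
--         if mass >= num:
--             mass += num
--         else:
--             return False
--     return True
-- ===== SOURCE B (Python) =====
-- from itertools import accumulate
-- from typing import List
--
-- def asteroidsDestroyed(mass: int, asteroids: List[int]) -> bool:
--     asteroids.sort()  # same in-place mutation as A; the rest reads, never simulates absorption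
--     # The answer is monotone in mass: compute the minimal sufficient starting mass,
--     # a statistic of the list alone (largest deficit a_i - sum(a[:i])), then compare once.
--     deficits = [a - p for p, a in zip(accumulate(asteroids, initial=0), asteroids)]
--     return not deficits or mass >= max(deficits)
-- ===== Notes on version B (the rewrite author's own statement) =====
-- stated objective: alternative
-- what changed: Instead of simulating absorption with a growing mass and an early exit, B computes a mass-independent statistic of the sorted list -- the minimal sufficient starting mass, max over i of (asteroids[i] - sum of the first i elements) -- and answers with a single comparison of mass against it.
import Mathlib
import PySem

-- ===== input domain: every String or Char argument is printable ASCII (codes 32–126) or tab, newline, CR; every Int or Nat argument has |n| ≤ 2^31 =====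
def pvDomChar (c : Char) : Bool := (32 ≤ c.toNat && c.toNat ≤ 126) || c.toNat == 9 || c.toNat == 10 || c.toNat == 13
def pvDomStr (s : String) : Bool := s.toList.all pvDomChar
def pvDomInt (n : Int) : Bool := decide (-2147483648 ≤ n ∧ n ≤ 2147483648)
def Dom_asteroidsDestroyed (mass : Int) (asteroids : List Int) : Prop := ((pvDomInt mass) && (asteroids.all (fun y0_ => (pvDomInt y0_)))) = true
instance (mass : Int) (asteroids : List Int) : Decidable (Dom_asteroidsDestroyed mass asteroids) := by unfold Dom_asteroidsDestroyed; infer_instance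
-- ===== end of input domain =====

-- B computes the minimal sufficient starting mass (a statistic of the sorted list alone)
-- and compares mass to it once, instead of simulating absorption with an early exit
-- (alternative, same cost); both Pythons mutate `asteroids` in place via .sort(); the
-- equivalence proved here is about the return value.

-- ===== PORT A =====
-- the for-loop over the sorted list with accumulator `mass`, early return False
def asteroidsDestroyedLoop (mass : Int) : List Int → Bool
  | [] => true
  | num :: rest => if mass ≥ num then asteroidsDestroyedLoop (mass + num) rest else false

def asteroidsDestroyed (mass : Int) (asteroids : List Int) : Bool :=
  asteroidsDestroyedLoop mass (PySem.List.sorted asteroids (fun x => x))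

-- ===== PORT B =====
def asteroidsDestroyed_alt (mass : Int) (asteroids : List Int) : Bool :=
  let s := PySem.List.sorted asteroids (fun x => x)
  -- accumulate(s, initial=0) = scanl (+) 0 s; zip truncates to s's length
  let deficits := ((List.scanl (· + ·) 0 s).zip s).map (fun p => p.2 - p.1)
  -- `not deficits or mass >= max(deficits)`
  if deficits.isEmpty then true
  else
    match PySem.List.max? deficits (fun x => x) with
    | some m => decide (mass ≥ m)
    | none => true

-- ===== PRECONDITION & SPEC =====
def Spec_asteroidsDestroyed (mass : Int) (asteroids : List Int) (out : Bool) : Prop := out = asteroidsDestroyed_alt mass asteroids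
instance (mass : Int) (asteroids : List Int) (out : Bool) : Decidable (Spec_asteroidsDestroyed mass asteroids out) := by unfold Spec_asteroidsDestroyed; infer_instance

-- ===== CLAIM (what is proved, stated in full; the proofs are below) =====
def Claim_equal_asteroidsDestroyed : Prop := ∀ (mass : Int) (asteroids : List Int), Dom_asteroidsDestroyed mass asteroids → Spec_asteroidsDestroyed mass asteroids (asteroidsDestroyed mass asteroids)

-- ===== LEMMAS AND PROOFS =====

-- A's loop, started at mass + c, checks exactly "mass ≥ deficit" for every
-- (prefix-sum-from-c, element) pair.
theorem loop_eq_deficits (l : List Int) : ∀ (mass c : Int),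
    asteroidsDestroyedLoop (mass + c) l
      = ((List.scanl (· + ·) c l).zip l).all (fun p => decide (mass ≥ p.2 - p.1)) := by
  induction l with
  | nil => intro mass c; simp [asteroidsDestroyedLoop]
  | cons a rest ih =>
      intro mass c
      rw [List.scanl_cons]
      simp only [List.zip_cons_cons, List.all_cons, asteroidsDestroyedLoop]
      have hc : mass + c + a = mass + (c + a) := by ring
      by_cases h : mass + c ≥ a
      · have h' : mass ≥ a - c := by omega
        simp [h, h', hc, ih]
      · have h' : ¬ mass ≥ a - c := by omega
        simp [h, h']

-- "mass ≥ every element of a nonempty list" is the same as "mass ≥ its max".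
theorem all_le_iff_max (mass : Int) (ds : List Int) (h : ds ≠ []) :
    ds.all (fun d => decide (mass ≥ d))
      = match PySem.List.max? ds (fun x => x) with
        | some m => decide (mass ≥ m)
        | none => true := by
  cases hmx : PySem.List.max? ds (fun x => x) with
  | none => exact absurd ((PySem.List.max?_eq_none_iff ds _).mp hmx) h
  | some m =>
      have hmem := PySem.List.max?_mem hmx
      have hmax := PySem.List.max?_isMax hmx
      by_cases hge : mass ≥ m
      · have hall : ∀ d ∈ ds, mass ≥ d := fun d hd => le_trans (hmax d hd) hge
        simp only [hge, decide_true]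
        simp only [List.all_eq_true, decide_eq_true_eq, ge_iff_le]
        exact fun x hx => hall x hx
      · simp only [hge, decide_false]
        simp only [List.all_eq_false, ge_iff_le]
        exact ⟨m, hmem, by simpa using hge⟩

-- ===== VERDICT (by name: the statement is the Claim_ definition above) =====
theorem asteroidsDestroyed_spec : Claim_equal_asteroidsDestroyed := by
  intro mass asteroids _
  unfold Spec_asteroidsDestroyed asteroidsDestroyed asteroidsDestroyed_alt
  generalize (PySem.List.sorted asteroids fun x => x) = s
  show asteroidsDestroyedLoop mass s
      = (if (((List.scanl (· + ·) 0 s).zip s).map (fun p => p.2 - p.1)).isEmpty then true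
         else match PySem.List.max? (((List.scanl (· + ·) 0 s).zip s).map (fun p => p.2 - p.1)) (fun x => x) with
              | some m => decide (mass ≥ m)
              | none => true)
  have hloop : asteroidsDestroyedLoop mass s
      = ((List.scanl (· + ·) 0 s).zip s).all (fun p => decide (mass ≥ p.2 - p.1)) := by
    simpa using loop_eq_deficits s mass 0
  have hall : ((List.scanl (· + ·) 0 s).zip s).all (fun p => decide (mass ≥ p.2 - p.1))
      = ((((List.scanl (· + ·) 0 s).zip s).map (fun p => p.2 - p.1)).all (fun d => decide (mass ≥ d))) := by
    rw [List.all_map]; rfl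
  by_cases hempty : (((List.scanl (· + ·) 0 s).zip s).map (fun p => p.2 - p.1)).isEmpty
  · rw [if_pos hempty, hloop, hall, List.isEmpty_iff.mp hempty, List.all_nil]
  · rw [if_neg hempty, hloop, hall,
        all_le_iff_max mass _ (by simpa [List.isEmpty_iff] using hempty)]
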